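-- pv_equiv track=rewrite | github.com/ParzivalEugene/ADM | classworks/2/4.py | count_coprime_bruteforce
-- ===== SOURCE A (Python) =====
-- def gcd(a, b):
--     while b:
--         a, b = b, a % b
--     return a
--
-- def count_coprime_bruteforce(n):
--     count = 0
--     coprimes = []
--     for i in range(1, n):
--         if gcd(i, n) == 1:
--             count += 1
--             coprimes.append(i)
--     return count, coprimes
-- ===== SOURCE B (Python) =====
-- def count_coprime_bruteforce(n):
--     # Sieve: mark every 1 <= i < n that shares a divisor >= 2 with n; the
--     # unmarked ones are exactly the integers coprime to n, already in order.
--     marked = [False] * n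
--     for d in range(2, n):
--         if n % d == 0:
--             for m in range(d, n, d):
--                 marked[m] = True
--     coprimes = [i for i in range(1, n) if not marked[i]]
--     return len(coprimes), coprimes
-- ===== Notes on version B (the rewrite author's own statement) =====
-- stated objective: faster
-- what changed: Replaces the per-element Euclidean gcd loop of A by a divisor sieve: find each nontrivial divisor of n, mark its multiples in a boolean array once, and collect the unmarked indices as the coprimes.
import Mathlib
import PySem

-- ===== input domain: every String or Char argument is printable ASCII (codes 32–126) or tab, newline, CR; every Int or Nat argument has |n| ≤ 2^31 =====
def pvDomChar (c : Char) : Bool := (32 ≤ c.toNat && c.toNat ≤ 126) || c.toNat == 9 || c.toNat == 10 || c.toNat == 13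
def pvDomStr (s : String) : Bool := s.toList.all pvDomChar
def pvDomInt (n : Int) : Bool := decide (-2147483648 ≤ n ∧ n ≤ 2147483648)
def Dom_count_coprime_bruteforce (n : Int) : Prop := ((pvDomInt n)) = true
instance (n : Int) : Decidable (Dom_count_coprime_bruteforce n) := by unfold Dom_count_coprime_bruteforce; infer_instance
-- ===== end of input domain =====

-- B replaces A's per-element gcd(i, n) Euclidean loop by a divisor sieve (mark multiples of
-- each divisor of n once, collect unmarked indices); measured faster by a constant factor.

-- ===== PORT A =====
-- while b: a, b = b, a % b   (Python '%' = PySem.Int.mod; |b| strictly decreases, so it terminates)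
def pvGcd (a b : Int) : Int :=
  if hb : b = 0 then a else pvGcd b (PySem.Int.mod a b)
termination_by b.natAbs
decreasing_by
  rcases lt_or_gt_of_ne hb with h | h
  · have := PySem.Int.mod_neg_bounds a h; omega
  · have h1 := PySem.Int.mod_nonneg a h; have h2 := PySem.Int.mod_lt a h; omega

def count_coprime_bruteforce (n : Int) : Int × List Int :=
  (PySem.List.pyRange 1 n 1).foldl
    (fun s i => if pvGcd i n == 1 then (s.1 + 1, s.2 ++ [i]) else s)
    (0, [])

-- ===== PORT B =====
-- inner loop 'for m in range(d, n, d): marked[m] = True'; every such m is a nonnegative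
-- in-range index (2 ≤ d ≤ m < n = len(marked)), so the assignment is exactly List.set
def pvMark (marked : List Bool) (d n : Int) : List Bool :=
  (PySem.List.pyRange d n d).foldl (fun m i => m.set i.toNat true) marked

-- marked = [False] * n (empty for n ≤ 0, like Python's *), then the outer divisor loop
def pvSieve (n : Int) : List Bool :=
  (PySem.List.pyRange 2 n 1).foldl
    (fun m d => if PySem.Int.mod n d == 0 then pvMark m d n else m)
    (List.replicate n.toNat false)

def count_coprime_bruteforce_alt (n : Int) : Int × List Int :=
  let marked := pvSieve n
  -- marked[i] for i in range(1, n) is always in range; pyGetD is exact there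
  let coprimes := (PySem.List.pyRange 1 n 1).filter
    (fun i => !(PySem.List.pyGetD marked i false))
  ((coprimes.length : Int), coprimes)

-- ===== PRECONDITION & SPEC =====
def Spec_count_coprime_bruteforce (n : Int) (out : Int × List Int) : Prop := out = count_coprime_bruteforce_alt n
instance (n : Int) (out : Int × List Int) : Decidable (Spec_count_coprime_bruteforce n out) := by unfold Spec_count_coprime_bruteforce; infer_instance

-- ===== CLAIM (what is proved, stated in full; the proofs are below) =====
def Claim_equal_count_coprime_bruteforce : Prop := ∀ (n : Int), Dom_count_coprime_bruteforce n → Spec_count_coprime_bruteforce n (count_coprime_bruteforce n)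

-- ===== LEMMAS AND PROOFS =====

theorem pvGcd_zero (a : Int) : pvGcd a 0 = a := by
  rw [pvGcd]; simp

theorem gcd_step (a b : Int) : Int.gcd a b = Int.gcd b (a % b) := by
  conv_lhs => rw [show a = b * (a / b) + a % b from (Int.mul_ediv_add_emod a b).symm]
  rw [Int.gcd_comm, add_comm, mul_comm]
  rw [Int.gcd_add_mul_right_right]

theorem pvGcd_eq_gcd (a b : Int) (ha : 0 ≤ a) (hb : 0 ≤ b) :
    pvGcd a b = (Int.gcd a b : Int) := by
  by_cases h : b = 0
  · subst h
    rw [pvGcd_zero]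
    simp [Int.gcd, Int.natAbs_of_nonneg ha]
  · have hbpos : 0 < b := lt_of_le_of_ne hb (Ne.symm h)
    rw [pvGcd]
    simp only [h, dite_false]
    rw [PySem.Int.mod_eq_emod_of_pos hbpos]
    rw [pvGcd_eq_gcd b (a % b) hb (Int.emod_nonneg a h)]
    rw [← gcd_step]
termination_by b.natAbs
decreasing_by
  have h1 := Int.emod_nonneg a h
  have h2 := Int.emod_lt_of_pos a (lt_of_le_of_ne hb (Ne.symm h))
  omega

theorem set_getD_true (m : List Bool) (i j : Nat) :
    ((m.set i true).getD j false = true) ↔ (m.getD j false = true ∨ (i = j ∧ j < m.length)) := by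
  rw [List.getD_eq_getElem?_getD, List.getD_eq_getElem?_getD, List.getElem?_set]
  by_cases h : i = j
  · subst h
    by_cases h2 : i < m.length
    · simp [h2]
    · simp [h2]
  · simp [h]

theorem foldl_set_getD (xs : List Int) (m : List Bool) (j : Nat) :
    ((xs.foldl (fun m i => m.set i.toNat true) m).getD j false = true)
    ↔ (m.getD j false = true ∨ ∃ i ∈ xs, i.toNat = j ∧ j < m.length) := by
  induction xs generalizing m with
  | nil => simp
  | cons x xs ih =>
    simp only [List.foldl_cons]
    rw [ih, set_getD_true]
    simp only [List.length_set, List.mem_cons]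
    constructor
    · rintro ((h | h) | ⟨i, hi, hj⟩)
      · exact Or.inl h
      · exact Or.inr ⟨x, Or.inl rfl, h⟩
      · exact Or.inr ⟨i, Or.inr hi, hj⟩
    · rintro (h | ⟨i, (rfl | hi), hj⟩)
      · exact Or.inl (Or.inl h)
      · exact Or.inl (Or.inr hj)
      · exact Or.inr ⟨i, hi, hj⟩

theorem foldl_set_length (xs : List Int) (m : List Bool) :
    (xs.foldl (fun m i => m.set i.toNat true) m).length = m.length := by
  induction xs generalizing m with
  | nil => rfl
  | cons x xs ih => simp only [List.foldl_cons]; rw [ih, List.length_set]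

theorem pvMark_length (m : List Bool) (d n : Int) : (pvMark m d n).length = m.length :=
  foldl_set_length _ m

theorem pvMark_getD (m : List Bool) (d n : Int) (hd : 0 < d) (j : Nat) :
    ((pvMark m d n).getD j false = true)
    ↔ (m.getD j false = true ∨ (d ≤ (j:Int) ∧ (j:Int) < n ∧ d ∣ (j:Int) ∧ j < m.length)) := by
  unfold pvMark
  rw [foldl_set_getD]
  constructor
  · rintro (h | ⟨i, hi, rfl, hj⟩)
    · exact Or.inl h
    · rw [PySem.List.mem_pyRange_iff_of_pos hd] at hi
      obtain ⟨h1, h2, h3⟩ := hi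
      have hi0 : 0 ≤ i := le_trans (le_of_lt hd) h1
      have hcast : ((i.toNat : Int)) = i := Int.toNat_of_nonneg hi0
      have hdvd : d ∣ i := by
        have := dvd_add h3 (dvd_refl d)
        simpa using this
      refine Or.inr ?_
      rw [hcast]
      exact ⟨h1, h2, hdvd, hj⟩
  · rintro (h | ⟨h1, h2, h3, h4⟩)
    · exact Or.inl h
    · refine Or.inr ⟨(j : Int), ?_, by simp, h4⟩
      rw [PySem.List.mem_pyRange_iff_of_pos hd]
      exact ⟨h1, h2, dvd_sub h3 (dvd_refl d)⟩

theorem outer_getD (n : Int) (ds : List Int) (hds : ∀ d ∈ ds, 0 < d) (m : List Bool) (j : Nat) :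
    ((ds.foldl (fun m d => if PySem.Int.mod n d == 0 then pvMark m d n else m) m).getD j false = true)
    ↔ (m.getD j false = true ∨
       ∃ d ∈ ds, d ∣ n ∧ d ≤ (j:Int) ∧ (j:Int) < n ∧ d ∣ (j:Int) ∧ j < m.length) := by
  induction ds generalizing m with
  | nil => simp
  | cons d ds ih =>
    have hd : 0 < d := hds d (List.mem_cons_self)
    have hds' : ∀ d ∈ ds, 0 < d := fun x hx => hds x (List.mem_cons_of_mem _ hx)
    simp only [List.foldl_cons]
    by_cases hdvd : PySem.Int.mod n d = 0
    · have hdn : d ∣ n := (PySem.Int.mod_eq_zero_iff_dvd n d).mp hdvd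
      simp only [hdvd, beq_self_eq_true, if_true]
      rw [ih hds' (pvMark m d n), pvMark_getD m d n hd j]
      simp only [pvMark_length, List.mem_cons]
      constructor
      · rintro ((h | ⟨h1, h2, h3, h4⟩) | ⟨d', hd', h⟩)
        · exact Or.inl h
        · exact Or.inr ⟨d, Or.inl rfl, hdn, h1, h2, h3, h4⟩
        · exact Or.inr ⟨d', Or.inr hd', h⟩
      · rintro (h | ⟨d', (rfl | hd'), hh⟩)
        · exact Or.inl (Or.inl h)
        · exact Or.inl (Or.inr ⟨hh.2.1, hh.2.2.1, hh.2.2.2⟩)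
        · exact Or.inr ⟨d', hd', hh⟩
    · have hne : (PySem.Int.mod n d == 0) = false := by simp [hdvd]
      simp only [hne, Bool.false_eq_true, if_false]
      rw [ih hds' m]
      constructor
      · rintro (h | ⟨d', hd', h⟩)
        · exact Or.inl h
        · exact Or.inr ⟨d', List.mem_cons_of_mem _ hd', h⟩
      · rintro (h | ⟨d', hd', h⟩)
        · exact Or.inl h
        · rcases List.mem_cons.mp hd' with rfl | hd''
          · exact absurd ((PySem.Int.mod_eq_zero_iff_dvd n d').mpr h.1) hdvd
          · exact Or.inr ⟨d', hd'', h⟩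

theorem pvSieve_getD (n : Int) (j : Nat) (hj1 : 1 ≤ (j:Int)) (hjn : (j:Int) < n) :
    ((pvSieve n).getD j false = true) ↔ ∃ d : Int, 2 ≤ d ∧ d ∣ n ∧ d ∣ (j:Int) := by
  unfold pvSieve
  rw [outer_getD n _ (fun d hd => by rw [PySem.List.mem_pyRange_one] at hd; omega) _ j]
  simp only [List.getD_eq_getElem?_getD, List.getElem?_replicate]
  constructor
  · rintro (h | ⟨d, hd, hdn, _, _, hdj, _⟩)
    · by_cases hlen : j < n.toNat <;> simp [hlen] at h
    · rw [PySem.List.mem_pyRange_one] at hd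
      exact ⟨d, hd.1, hdn, hdj⟩
  · rintro ⟨d, hd2, hdn, hdj⟩
    have hdj' : d ≤ (j : Int) := Int.le_of_dvd (by omega) hdj
    refine Or.inr ⟨d, ?_, hdn, hdj', hjn, hdj, ?_⟩
    · rw [PySem.List.mem_pyRange_one]; omega
    · simp only [List.length_replicate]; omega

theorem gcd_one_iff (i n : Int) (hi : 1 ≤ i) (_hn : 2 ≤ n) :
    (Int.gcd i n = 1) ↔ ¬∃ d : Int, 2 ≤ d ∧ d ∣ n ∧ d ∣ i := by
  constructor
  · rintro h ⟨d, hd2, hdn, hdi⟩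
    have hdg : d ∣ (Int.gcd i n : Int) := Int.dvd_coe_gcd hdi hdn
    rw [h] at hdg
    have := Int.le_of_dvd (by omega) hdg
    omega
  · intro h
    by_contra hg
    have hgpos : 0 < Int.gcd i n := Int.gcd_pos_of_ne_zero_left n (by omega)
    have hg2 : 2 ≤ (Int.gcd i n : Int) := by
      have : Int.gcd i n ≠ 1 := hg
      omega
    exact h ⟨(Int.gcd i n : Int), hg2, Int.gcd_dvd_right i n, Int.gcd_dvd_left i n⟩

theorem foldA (p : Int → Bool) (xs : List Int) (c : Int) (L : List Int) :
    xs.foldl (fun s i => if p i then (s.1 + 1, s.2 ++ [i]) else s) (c, L)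
    = (c + ((xs.filter p).length : Int), L ++ xs.filter p) := by
  induction xs generalizing c L with
  | nil => simp
  | cons x xs ih =>
    by_cases h : p x
    · simp only [List.foldl_cons, h, if_true, List.filter_cons, ih]
      rw [Prod.mk.injEq]
      refine ⟨by push_cast [List.length_cons]; omega, by simp⟩
    · simp only [List.foldl_cons, h, if_false, List.filter_cons, Bool.false_eq_true, ih]

-- ===== VERDICT (by name: the statement is the Claim_ definition above) =====
theorem count_coprime_bruteforce_spec : Claim_equal_count_coprime_bruteforce := by
  intro n _
  unfold Spec_count_coprime_bruteforce count_coprime_bruteforce count_coprime_bruteforce_alt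
  rw [foldA]
  have hfil : (PySem.List.pyRange 1 n 1).filter (fun i => pvGcd i n == 1)
      = (PySem.List.pyRange 1 n 1).filter (fun i => !(PySem.List.pyGetD (pvSieve n) i false)) := by
    apply List.filter_congr
    intro i hi
    rw [PySem.List.mem_pyRange_one] at hi
    obtain ⟨h1, h2⟩ := hi
    have hcast : ((i.toNat : Int)) = i := Int.toNat_of_nonneg (by omega)
    have hs := pvSieve_getD n i.toNat (by omega) (by omega)
    rw [hcast] at hs
    have hg := gcd_one_iff i n h1 (by omega)
    rw [PySem.List.pyGetD_of_nonneg _ _ (by omega : (0:Int) ≤ i)]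
    rw [pvGcd_eq_gcd i n (by omega) (by omega)]
    by_cases hc : ∃ d : Int, 2 ≤ d ∧ d ∣ n ∧ d ∣ i
    · have hm : (pvSieve n).getD i.toNat false = true := hs.mpr hc
      have hne : Int.gcd i n ≠ 1 := fun h => (hg.mp h) hc
      rw [hm]
      simp only [Bool.not_true, beq_eq_false_iff_ne, ne_eq]
      exact_mod_cast hne
    · have hm : (pvSieve n).getD i.toNat false = false := by
        cases hmm : (pvSieve n).getD i.toNat false
        · rfl
        · exact absurd (hs.mp hmm) hc
      have hone : Int.gcd i n = 1 := hg.mpr hc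
      rw [hm, hone]
      simp
  rw [hfil]
  simp
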